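-- pv_equiv track=rewrite | github.com/michaelerne/adventofcode-2025 | day_02.py | generate_invalid_ids_upto
-- ===== SOURCE A (Python) =====
-- from typing import List, Tuple, Set
--
-- def generate_invalid_ids_upto(max_value: int, half_only: bool) -> List[int]:
--     invalid_ids: Set[int] = set()
--     max_digits = len(str(max_value))
--
--     max_block_digits = max_digits // 2 if half_only else max_digits - 1
--
--     for block_digits in range(1, max_block_digits + 1):
--         if half_only:
--             repetition_counts = (2,)
--         else:
--             max_repetitions = max_digits // block_digits
--             if max_repetitions < 2:
--                 continue
--             repetition_counts = range(2, max_repetitions + 1)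
--
--         block_shift = 10 ** block_digits
--
--         for repeat_count in repetition_counts:
--             total_digits = block_digits * repeat_count
--
--             multiplier = (block_shift ** repeat_count - 1) // (block_shift - 1)
--
--             block_start = 10 ** (block_digits - 1)
--             block_end_full = 10 ** block_digits - 1
--
--             if total_digits < max_digits:
--                 block_end = block_end_full
--             else:
--                 block_end = min(block_end_full, max_value // multiplier)
--                 if block_end < block_start:
--                     continue
--
--             for block in range(block_start, block_end + 1):
--                 invalid_ids.add(block * multiplier)
--
--     return sorted(invalid_ids)
-- ===== SOURCE B (Python) =====
-- def generate_invalid_ids_upto(max_value: int, half_only: bool):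
--     max_digits = len(str(max_value))
--     found = set()
--     # iterate by TOTAL length, then by proper divisors of it (block length),
--     # build each candidate by an accumulating shift loop and filter against max_value
--     for total in range(2, max_digits + 1):
--         for d in range(1, total):
--             if total % d != 0:
--                 continue
--             if half_only and total != 2 * d:
--                 continue
--             rep = total // d
--             base = 10 ** d
--             for block in range(10 ** (d - 1), 10 ** d):
--                 value = 0
--                 for _ in range(rep):
--                     value = value * base + block
--                 if total < max_digits or value <= max_value:
--                     found.add(value)
--     return sorted(found)
-- ===== Notes on version B (the rewrite author's own statement) =====
-- stated objective: alternative
-- what changed: B enumerates candidates by total digit-length and its proper divisors (block length), builds each number with an accumulating shift loop, and filters with value <= max_value, instead of A's block_digits/repeat_count loops with a precomputed geometric-series multiplier and a clipped block_end range.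
import Mathlib
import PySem

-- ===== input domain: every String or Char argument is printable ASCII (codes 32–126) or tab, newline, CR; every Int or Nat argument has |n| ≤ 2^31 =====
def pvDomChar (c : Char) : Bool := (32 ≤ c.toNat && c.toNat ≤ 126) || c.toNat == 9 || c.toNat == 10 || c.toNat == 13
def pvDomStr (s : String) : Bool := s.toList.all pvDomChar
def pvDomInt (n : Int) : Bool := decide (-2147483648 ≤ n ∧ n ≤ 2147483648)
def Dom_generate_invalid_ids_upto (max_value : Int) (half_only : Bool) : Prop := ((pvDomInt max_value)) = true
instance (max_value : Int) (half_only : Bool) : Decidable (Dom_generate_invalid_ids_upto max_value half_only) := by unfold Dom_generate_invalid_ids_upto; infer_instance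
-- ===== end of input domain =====

-- B re-implements A by enumerating candidates by total digit-length and its proper divisors,
-- building each number with an accumulating shift loop and filtering with value <= max_value
-- (objective: alternative decomposition; same cost).

-- Python '**' on ints; exact for nonnegative exponents (the only ones occurring in either program)
def pvPow (b e : Int) : Int := b ^ e.toNat

-- ===== PORT A =====
-- the body of A's 'for repeat_count in repetition_counts' loop
def pvBodyA (max_value max_digits block_digits : Int) (s : PySem.Set Int)
    (repeat_count : Int) : PySem.Set Int :=
  let block_shift := pvPow 10 block_digits
  let total_digits := block_digits * repeat_count
  let multiplier := PySem.Int.floordiv (pvPow block_shift repeat_count - 1) (block_shift - 1)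
  let block_start := pvPow 10 (block_digits - 1)
  let block_end_full := pvPow 10 block_digits - 1
  if total_digits < max_digits then
    (PySem.List.pyRange block_start (block_end_full + 1) 1).foldl
      (fun s block => PySem.Set.add s (block * multiplier)) s
  else
    let block_end := min block_end_full (PySem.Int.floordiv max_value multiplier)
    if block_end < block_start then s
    else
      (PySem.List.pyRange block_start (block_end + 1) 1).foldl
        (fun s block => PySem.Set.add s (block * multiplier)) s

-- the body of A's 'for block_digits in range(...)' loop
def pvStepA (max_value max_digits : Int) (half_only : Bool) (s : PySem.Set Int)
    (block_digits : Int) : PySem.Set Int :=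
  if half_only then
    [(2 : Int)].foldl (pvBodyA max_value max_digits block_digits) s
  else
    let max_repetitions := PySem.Int.floordiv max_digits block_digits
    if max_repetitions < 2 then s
    else (PySem.List.pyRange 2 (max_repetitions + 1) 1).foldl
      (pvBodyA max_value max_digits block_digits) s

def pvLoopA (max_value max_digits : Int) (half_only : Bool) : PySem.Set Int :=
  let max_block_digits : Int :=
    if half_only then PySem.Int.floordiv max_digits 2 else max_digits - 1
  (PySem.List.pyRange 1 (max_block_digits + 1) 1).foldl
    (pvStepA max_value max_digits half_only) PySem.Set.empty

def generate_invalid_ids_upto (max_value : Int) (half_only : Bool) : List Int :=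
  PySem.List.sorted
    (pvLoopA max_value (PySem.Str.len (PySem.Int.toStr max_value)) half_only)
    (fun x => x) false

-- ===== PORT B =====
-- the body of B's 'for block in range(...)' loop
def pvInnerB (max_value max_digits total d : Int) (s : PySem.Set Int)
    (block : Int) : PySem.Set Int :=
  let rep := PySem.Int.floordiv total d
  let base := pvPow 10 d
  let value := (PySem.List.pyRange 0 rep 1).foldl (fun v _ => v * base + block) 0
  if total < max_digits ∨ value ≤ max_value then PySem.Set.add s value else s

-- the body of B's 'for d in range(1, total)' loop
def pvStepB (max_value max_digits : Int) (half_only : Bool) (total : Int)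
    (s : PySem.Set Int) (d : Int) : PySem.Set Int :=
  if PySem.Int.mod total d ≠ 0 then s
  else if half_only = true ∧ total ≠ 2 * d then s
  else
    (PySem.List.pyRange (pvPow 10 (d - 1)) (pvPow 10 d) 1).foldl
      (pvInnerB max_value max_digits total d) s

def pvLoopB (max_value max_digits : Int) (half_only : Bool) : PySem.Set Int :=
  (PySem.List.pyRange 2 (max_digits + 1) 1).foldl (fun s total =>
    (PySem.List.pyRange 1 total 1).foldl
      (pvStepB max_value max_digits half_only total) s)
    PySem.Set.empty

def generate_invalid_ids_upto_alt (max_value : Int) (half_only : Bool) : List Int :=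
  PySem.List.sorted
    (pvLoopB max_value (PySem.Str.len (PySem.Int.toStr max_value)) half_only)
    (fun x => x) false

-- ===== PRECONDITION & SPEC =====
def Spec_generate_invalid_ids_upto (max_value : Int) (half_only : Bool) (out : List Int) : Prop := out = generate_invalid_ids_upto_alt max_value half_only
instance (max_value : Int) (half_only : Bool) (out : List Int) : Decidable (Spec_generate_invalid_ids_upto max_value half_only out) := by unfold Spec_generate_invalid_ids_upto; infer_instance

-- ===== CLAIM (what is proved, stated in full; the proofs are below) =====
def Claim_equal_generate_invalid_ids_upto : Prop := ∀ (max_value : Int) (half_only : Bool), Dom_generate_invalid_ids_upto max_value half_only → Spec_generate_invalid_ids_upto max_value half_only (generate_invalid_ids_upto max_value half_only)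

-- ===== LEMMAS AND PROOFS =====

-- generic membership through a fold whose step satisfies a membership law on the traversed list
theorem pv_mem_foldl {α β : Type} [BEq α] [LawfulBEq α] (g : List α → β → List α)
    (C : β → α → Prop) (y : α) :
    ∀ (l : List β) (s : List α),
      (∀ s b, b ∈ l → (y ∈ g s b ↔ y ∈ s ∨ C b y)) →
      (y ∈ l.foldl g s ↔ y ∈ s ∨ ∃ b ∈ l, C b y) := by
  intro l
  induction l with
  | nil => simp
  | cons b l ih =>
    intro s hg
    simp only [List.foldl_cons]
    rw [ih _ (fun s b hb => hg s b (List.mem_cons_of_mem _ hb)),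
        hg s b (List.mem_cons_self ..)]
    simp only [List.mem_cons]
    constructor
    · rintro ((h | h) | ⟨c, hc, h⟩)
      · exact Or.inl h
      · exact Or.inr ⟨b, Or.inl rfl, h⟩
      · exact Or.inr ⟨c, Or.inr hc, h⟩
    · rintro (h | ⟨c, (rfl | hc), h⟩)
      · exact Or.inl (Or.inl h)
      · exact Or.inl (Or.inr h)
      · exact Or.inr ⟨c, hc, h⟩

-- generic nodup preservation through a fold
theorem pv_nodup_foldl {α β : Type} (g : List α → β → List α)
    (hg : ∀ s b, s.Nodup → (g s b).Nodup) :
    ∀ (l : List β) (s : List α), s.Nodup → (l.foldl g s).Nodup := by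
  intro l
  induction l with
  | nil => exact fun s hs => hs
  | cons b l ih => exact fun s hs => ih _ (hg s b hs)

-- geometric sum 1 + s + … + s^(r-1), in the shape both programs produce it
def pvG (s : Int) : Nat → Int
  | 0 => 0
  | n + 1 => pvG s n * s + 1

theorem pvG_nonneg (s : Int) (hs : 0 ≤ s) : ∀ n, 0 ≤ pvG s n := by
  intro n
  induction n with
  | zero => simp [pvG]
  | succ n ih => simp only [pvG]; positivity

theorem pvG_pos (s : Int) (hs : 0 ≤ s) (n : Nat) (hn : 1 ≤ n) : 0 < pvG s n := by
  obtain ⟨k, rfl⟩ := Nat.exists_eq_add_of_le hn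
  have := pvG_nonneg s hs k
  simp only [Nat.add_comm 1 k, pvG]
  nlinarith

theorem pv_geom_mul (s : Int) (r : Nat) : (s - 1) * pvG s r = s ^ r - 1 := by
  induction r with
  | zero => simp [pvG]
  | succ r ih =>
    simp only [pvG, pow_succ]
    linear_combination s * ih

-- A's multiplier equals the geometric sum
theorem pv_mult_eq (s : Int) (hs : 2 ≤ s) (r : Nat) :
    PySem.Int.floordiv (s ^ r - 1) (s - 1) = pvG s r := by
  rw [PySem.Int.floordiv_eq_ediv_of_pos (by omega), ← pv_geom_mul s r,
    Int.mul_ediv_cancel_left _ (by omega)]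

-- B's accumulation loop equals block times the geometric sum
theorem pv_val_eq (base block : Int) (r : Nat) :
    (PySem.List.pyRange 0 (r : Int) 1).foldl (fun v _ => v * base + block) 0
      = block * pvG base r := by
  induction r with
  | zero => simp [PySem.List.pyRange_one_eq_nil, pvG]
  | succ r ih =>
    push_cast
    rw [PySem.List.pyRange_one_succ_right (by positivity), List.foldl_append]
    push_cast at ih
    rw [ih]
    simp only [List.foldl_cons, List.foldl_nil, pvG]
    ring

-- 10^d for d ≥ 1 is at least 10
theorem pv_ten_pow_ge (d : Int) (hd : 1 ≤ d) : 10 ≤ pvPow 10 d := by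
  unfold pvPow
  calc (10 : Int) = 10 ^ 1 := (pow_one 10).symm
    _ ≤ 10 ^ d.toNat := by
        apply pow_le_pow_right₀ (by norm_num)
        omega

-- canonical per-(d,r) membership condition shared by the two programs
def pvC (mv m d r y : Int) : Prop :=
  ∃ b : Int, pvPow 10 (d - 1) ≤ b ∧ b ≤ pvPow 10 d - 1 ∧
    (d * r < m ∨ b * pvG (pvPow 10 d) r.toNat ≤ mv) ∧
    y = b * pvG (pvPow 10 d) r.toNat

-- membership of A's repeat_count body
theorem pv_memBodyA (mv m d r : Int) (hd : 1 ≤ d) (hr : 2 ≤ r) (s : PySem.Set Int) (y : Int) :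
    y ∈ pvBodyA mv m d s r ↔ y ∈ s ∨ pvC mv m d r y := by
  have hs10 : 10 ≤ pvPow 10 d := pv_ten_pow_ge d hd
  have hs10' : (10 : Int) ≤ 10 ^ d.toNat := hs10
  have hmult : PySem.Int.floordiv (pvPow (pvPow 10 d) r - 1) (pvPow 10 d - 1)
      = pvG (pvPow 10 d) r.toNat := by
    unfold pvPow
    exact pv_mult_eq _ (by omega) _
  have hGpos : 0 < pvG (pvPow 10 d) r.toNat :=
    pvG_pos _ (by omega) _ (by omega)
  unfold pvBodyA
  simp only [hmult]
  set G := pvG (pvPow 10 d) r.toNat with hG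
  by_cases hlt : d * r < m
  · simp only [if_pos hlt]
    rw [PySem.Set.mem_foldl_add]
    unfold pvC
    constructor
    · rintro (h | ⟨b, hb, rfl⟩)
      · exact Or.inl h
      · rw [PySem.List.mem_pyRange_one] at hb
        exact Or.inr ⟨b, hb.1, by omega, Or.inl hlt, rfl⟩
    · rintro (h | ⟨b, h1, h2, _, rfl⟩)
      · exact Or.inl h
      · exact Or.inr ⟨b, PySem.List.mem_pyRange_one.mpr ⟨h1, by omega⟩, rfl⟩
  · simp only [if_neg hlt]
    have hiff : ∀ b : Int, b ≤ min (pvPow 10 d - 1) (PySem.Int.floordiv mv G)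
        ↔ b ≤ pvPow 10 d - 1 ∧ b * G ≤ mv := by
      intro b
      rw [le_min_iff, PySem.Int.le_floordiv_iff_mul_le hGpos]
    by_cases hend : min (pvPow 10 d - 1) (PySem.Int.floordiv mv G) < pvPow 10 (d - 1)
    · simp only [if_pos hend]
      unfold pvC
      constructor
      · exact Or.inl
      · rintro (h | ⟨b, h1, h2, hc, rfl⟩)
        · exact h
        · rcases hc with hc | hc
          · omega
          · have := (hiff b).mpr ⟨h2, hc⟩
            omega
    · simp only [if_neg hend]
      rw [PySem.Set.mem_foldl_add]
      unfold pvC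
      constructor
      · rintro (h | ⟨b, hb, rfl⟩)
        · exact Or.inl h
        · rw [PySem.List.mem_pyRange_one] at hb
          have := (hiff b).mp (by omega)
          exact Or.inr ⟨b, hb.1, this.1, Or.inr this.2, rfl⟩
      · rintro (h | ⟨b, h1, h2, hc, rfl⟩)
        · exact Or.inl h
        · rcases hc with hc | hc
          · omega
          · have := (hiff b).mpr ⟨h2, hc⟩
            exact Or.inr ⟨b, PySem.List.mem_pyRange_one.mpr ⟨h1, by omega⟩, rfl⟩

theorem pv_memA (mv m : Int) (h : Bool) (y : Int) :
    y ∈ pvLoopA mv m h ↔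
      ∃ d : Int, 1 ≤ d ∧ (if h then d * 2 ≤ m else d ≤ m - 1) ∧
        ∃ r : Int, (if h then r = 2 else 2 ≤ r ∧ r * d ≤ m) ∧ pvC mv m d r y := by
  unfold pvLoopA
  rw [pv_mem_foldl (pvStepA mv m h)
    (fun d y => ∃ r : Int, (if h then r = 2 else 2 ≤ r ∧ r * d ≤ m) ∧ pvC mv m d r y) y]
  · simp only [PySem.Set.empty, List.not_mem_nil, false_or]
    constructor
    · rintro ⟨d, hd, hP⟩
      rw [PySem.List.mem_pyRange_one] at hd
      refine ⟨d, hd.1, ?_, hP⟩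
      cases h with
      | true =>
        rw [if_pos rfl] at hd ⊢
        exact (PySem.Int.le_floordiv_iff_mul_le (by norm_num)).mp (by omega)
      | false =>
        rw [if_neg Bool.false_ne_true] at hd ⊢
        omega
    · rintro ⟨d, hd1, hd2, hP⟩
      refine ⟨d, PySem.List.mem_pyRange_one.mpr ⟨hd1, ?_⟩, hP⟩
      cases h with
      | true =>
        rw [if_pos rfl] at hd2 ⊢
        have : d ≤ PySem.Int.floordiv m 2 :=
          (PySem.Int.le_floordiv_iff_mul_le (by norm_num)).mpr hd2
        omega
      | false =>
        rw [if_neg Bool.false_ne_true] at hd2 ⊢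
        omega
  · intro s d hdmem
    rw [PySem.List.mem_pyRange_one] at hdmem
    have hd1 : 1 ≤ d := hdmem.1
    unfold pvStepA
    cases h with
    | true =>
      rw [if_pos rfl]
      simp only [List.foldl_cons, List.foldl_nil]
      rw [pv_memBodyA mv m d 2 hd1 (by norm_num)]
      simp
    | false =>
      simp only [if_neg Bool.false_ne_true]
      by_cases hmr : PySem.Int.floordiv m d < 2
      · rw [if_pos hmr]
        constructor
        · exact Or.inl
        · rintro (hy | ⟨r, ⟨hr2, hrd⟩, _⟩)
          · exact hy
          · have : r ≤ PySem.Int.floordiv m d :=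
              (PySem.Int.le_floordiv_iff_mul_le (by omega)).mpr hrd
            omega
      · rw [if_neg hmr]
        rw [pv_mem_foldl (pvBodyA mv m d) (fun r y => pvC mv m d r y) y]
        · constructor
          · rintro (hy | ⟨r, hr, hP⟩)
            · exact Or.inl hy
            · rw [PySem.List.mem_pyRange_one] at hr
              refine Or.inr ⟨r, ⟨hr.1, ?_⟩, hP⟩
              have : r ≤ PySem.Int.floordiv m d := by omega
              rw [← PySem.Int.le_floordiv_iff_mul_le (by omega)]
              omega
          · rintro (hy | ⟨r, ⟨hr2, hrd⟩, hP⟩)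
            · exact Or.inl hy
            · refine Or.inr ⟨r, PySem.List.mem_pyRange_one.mpr ⟨hr2, ?_⟩, hP⟩
              have : r ≤ PySem.Int.floordiv m d :=
                (PySem.Int.le_floordiv_iff_mul_le (by omega)).mpr hrd
              omega
        · intro s r hrmem
          rw [PySem.List.mem_pyRange_one] at hrmem
          exact pv_memBodyA mv m d r hd1 hrmem.1 s y

theorem pv_memB (mv m : Int) (h : Bool) (y : Int) :
    y ∈ pvLoopB mv m h ↔
      ∃ t : Int, 2 ≤ t ∧ t ≤ m ∧
        ∃ d : Int, 1 ≤ d ∧ d < t ∧ d ∣ t ∧ (h = true → t = 2 * d) ∧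
          pvC mv m d (PySem.Int.floordiv t d) y := by
  unfold pvLoopB
  rw [pv_mem_foldl _
    (fun t y => ∃ d : Int, 1 ≤ d ∧ d < t ∧ d ∣ t ∧ (h = true → t = 2 * d) ∧
      pvC mv m d (PySem.Int.floordiv t d) y) y]
  · simp only [PySem.Set.empty, List.not_mem_nil, false_or]
    constructor
    · rintro ⟨t, ht, hP⟩
      rw [PySem.List.mem_pyRange_one] at ht
      exact ⟨t, ht.1, by omega, hP⟩
    · rintro ⟨t, ht1, ht2, hP⟩
      exact ⟨t, PySem.List.mem_pyRange_one.mpr ⟨ht1, by omega⟩, hP⟩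
  · intro s t htmem
    rw [PySem.List.mem_pyRange_one] at htmem
    rw [pv_mem_foldl (pvStepB mv m h t)
      (fun d y => 1 ≤ d ∧ d < t ∧ d ∣ t ∧ (h = true → t = 2 * d) ∧
        pvC mv m d (PySem.Int.floordiv t d) y) y]
    · constructor
      · rintro (hy | ⟨d, _, hP⟩)
        · exact Or.inl hy
        · exact Or.inr ⟨d, hP⟩
      · rintro (hy | ⟨d, h1, h2, hP⟩)
        · exact Or.inl hy
        · exact Or.inr ⟨d, PySem.List.mem_pyRange_one.mpr ⟨h1, h2⟩, h1, h2, hP⟩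
    · intro s d hdmem
      rw [PySem.List.mem_pyRange_one] at hdmem
      have hd1 : 1 ≤ d := hdmem.1
      unfold pvStepB
      by_cases hdvd : d ∣ t
      · rw [if_neg (by simp [PySem.Int.mod_eq_zero_iff_dvd, hdvd])]
        by_cases hhalf : h = true ∧ t ≠ 2 * d
        · rw [if_pos hhalf]
          constructor
          · exact Or.inl
          · rintro (hy | ⟨_, _, _, hh, _⟩)
            · exact hy
            · exact absurd (hh hhalf.1) hhalf.2
        · rw [if_neg hhalf]
          push Not at hhalf
          have hrep0 : 0 ≤ PySem.Int.floordiv t d := by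
            rw [PySem.Int.floordiv_eq_ediv_of_pos (by omega)]
            exact Int.ediv_nonneg (by omega) (by omega)
          have hrep_mul : d * PySem.Int.floordiv t d = t := by
            rw [PySem.Int.floordiv_eq_ediv_of_pos (by omega), mul_comm]
            exact Int.ediv_mul_cancel hdvd
          have hcast : PySem.Int.floordiv t d = (((PySem.Int.floordiv t d).toNat : Nat) : Int) := by
            omega
          have hval : ∀ b : Int,
              (PySem.List.pyRange 0 (PySem.Int.floordiv t d) 1).foldl
                (fun v _ => v * pvPow 10 d + b) 0
              = b * pvG (pvPow 10 d) (PySem.Int.floordiv t d).toNat := by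
            intro b
            conv_lhs => rw [hcast]
            exact pv_val_eq _ _ _
          rw [pv_mem_foldl (pvInnerB mv m t d)
            (fun b y => (t < m ∨ b * pvG (pvPow 10 d) (PySem.Int.floordiv t d).toNat ≤ mv) ∧
              y = b * pvG (pvPow 10 d) (PySem.Int.floordiv t d).toNat) y]
          · constructor
            · rintro (hy | ⟨b, hb, hc, rfl⟩)
              · exact Or.inl hy
              · rw [PySem.List.mem_pyRange_one] at hb
                refine Or.inr ⟨hd1, hdmem.2, hdvd, hhalf, b, hb.1, by omega, ?_, rfl⟩
                rw [hrep_mul]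
                exact hc
            · rintro (hy | ⟨_, _, _, _, b, h1, h2, hc, rfl⟩)
              · exact Or.inl hy
              · rw [hrep_mul] at hc
                exact Or.inr ⟨b, PySem.List.mem_pyRange_one.mpr ⟨h1, by omega⟩, hc, rfl⟩
          · intro s b _
            unfold pvInnerB
            simp only []
            rw [hval b]
            split_ifs with hcond
            · rw [PySem.Set.mem_add]
              constructor
              · rintro (hy | rfl)
                · exact Or.inl hy
                · exact Or.inr ⟨hcond, rfl⟩
              · rintro (hy | ⟨_, rfl⟩)
                · exact Or.inl hy
                · exact Or.inr rfl
            · constructor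
              · exact Or.inl
              · rintro (hy | ⟨hc, _⟩)
                · exact hy
                · exact absurd hc hcond
      · rw [if_pos (by simp [PySem.Int.mod_eq_zero_iff_dvd, hdvd])]
        constructor
        · exact Or.inl
        · rintro (hy | ⟨_, _, hdt, _⟩)
          · exact hy
          · exact absurd hdt hdvd

theorem pv_floordiv_mul_cancel (d r : Int) (hd : 0 < d) :
    PySem.Int.floordiv (d * r) d = r := by
  rw [PySem.Int.floordiv_eq_ediv_of_pos hd]
  exact Int.mul_ediv_cancel_left _ (by omega)

theorem pv_mem_iff (mv m : Int) (h : Bool) (y : Int) :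
    y ∈ pvLoopA mv m h ↔ y ∈ pvLoopB mv m h := by
  rw [pv_memA, pv_memB]
  cases h with
  | true =>
    simp only [reduceIte]
    constructor
    · rintro ⟨d, hd1, hdm, r, rfl, hC⟩
      refine ⟨2 * d, by omega, by omega, d, hd1, by omega, ⟨2, by ring⟩, fun _ => rfl, ?_⟩
      rw [show (2 : Int) * d = d * 2 by ring, pv_floordiv_mul_cancel d 2 (by omega)]
      exact hC
    · rintro ⟨t, ht2, htm, d, hd1, hdt, hdvd, hh, hC⟩
      have ht := hh trivial
      subst ht
      rw [show (2 : Int) * d = d * 2 by ring, pv_floordiv_mul_cancel d 2 (by omega)] at hC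
      exact ⟨d, hd1, by omega, 2, rfl, hC⟩
  | false =>
    simp only [Bool.false_eq_true, false_implies, if_false]
    constructor
    · rintro ⟨d, hd1, hdm, r, ⟨hr2, hrd⟩, hC⟩
      have hrd' : d * r ≤ m := by rwa [mul_comm] at hrd
      have h2 : d * 2 ≤ d * r := mul_le_mul_of_nonneg_left (by omega) (by omega)
      refine ⟨d * r, by omega, by omega, d, hd1, by omega, ⟨r, rfl⟩,
        trivial, ?_⟩
      rw [pv_floordiv_mul_cancel d r (by omega)]
      exact hC
    · rintro ⟨t, ht2, htm, d, hd1, hdt, hdvd, _, hC⟩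
      obtain ⟨c, rfl⟩ := hdvd
      rw [pv_floordiv_mul_cancel d c (by omega)] at hC
      have hc2 : 2 ≤ c := by
        by_contra hcon
        push Not at hcon
        have : d * c ≤ d * 1 := mul_le_mul_of_nonneg_left (by omega) (by omega)
        omega
      exact ⟨d, hd1, by omega, c, ⟨hc2, by rw [mul_comm] at htm; exact htm⟩, hC⟩

theorem pv_nodup_bodyA (mv m d : Int) (s : PySem.Set Int) (r : Int) (hs : s.Nodup) :
    (pvBodyA mv m d s r).Nodup := by
  simp only [pvBodyA]
  split_ifs
  · exact pv_nodup_foldl _ (fun s b hs => PySem.Set.nodup_add _ _ hs) _ _ hs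
  · exact hs
  · exact pv_nodup_foldl _ (fun s b hs => PySem.Set.nodup_add _ _ hs) _ _ hs

theorem pv_nodupA (mv m : Int) (h : Bool) : (pvLoopA mv m h).Nodup := by
  unfold pvLoopA
  apply pv_nodup_foldl
  · intro s d hs
    simp only [pvStepA]
    split_ifs
    · exact pv_nodup_foldl _ (pv_nodup_bodyA mv m d) _ _ hs
    · exact hs
    · exact pv_nodup_foldl _ (pv_nodup_bodyA mv m d) _ _ hs
  · exact List.nodup_nil

theorem pv_nodupB (mv m : Int) (h : Bool) : (pvLoopB mv m h).Nodup := by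
  unfold pvLoopB
  apply pv_nodup_foldl
  · intro s t hs
    apply pv_nodup_foldl
    · intro s d hs
      simp only [pvStepB]
      split_ifs
      · exact hs
      · exact hs
      · apply pv_nodup_foldl
        · intro s b hs
          simp only [pvInnerB]
          split_ifs
          · exact PySem.Set.nodup_add _ _ hs
          · exact hs
        · exact hs
    · exact hs
  · exact List.nodup_nil

-- ===== VERDICT (by name: the statement is the Claim_ definition above) =====
theorem generate_invalid_ids_upto_spec : Claim_equal_generate_invalid_ids_upto := by
  intro mv h _
  unfold Spec_generate_invalid_ids_upto generate_invalid_ids_upto generate_invalid_ids_upto_alt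
  apply PySem.List.sorted_eq_sorted_of_perm _ _ _ (fun a b hab => hab)
  rw [List.perm_ext_iff_of_nodup (pv_nodupA ..) (pv_nodupB ..)]
  exact fun y => pv_mem_iff ..
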